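-- pv_equiv track=rewrite | github.com/pablo2811/Olimpiada-Informatyczna- | PLAK_NEW.py | poster_fast
-- ===== SOURCE A (Python) =====
-- def poster_fast(h):
--     q = []
--     counter = 0
--     for i in range(len(h)):
--         while len(q) and q[-1]>h[i]:
--             q.pop()
--         if not len(q) or q[-1] < h[i]:
--             counter += 1
--             q.append(h[i])
--     return counter
-- ===== SOURCE B (Python) =====
-- def poster_fast(h):
--     count = 0
--     for i in range(len(h)):
--         j = i - 1
--         while j >= 0 and h[j] > h[i]:
--             j -= 1
--         if j < 0 or h[j] < h[i]:
--             count += 1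
--     return count
-- ===== Notes on version B (the rewrite author's own statement) =====
-- stated objective: alternative
-- what changed: Replaces the monotonic stack (pop-then-maybe-push with a running counter) by a stack-free quadratic backward scan: for each position, scan left past taller values and count the position unless the first value not taller equals it.
import Mathlib
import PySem

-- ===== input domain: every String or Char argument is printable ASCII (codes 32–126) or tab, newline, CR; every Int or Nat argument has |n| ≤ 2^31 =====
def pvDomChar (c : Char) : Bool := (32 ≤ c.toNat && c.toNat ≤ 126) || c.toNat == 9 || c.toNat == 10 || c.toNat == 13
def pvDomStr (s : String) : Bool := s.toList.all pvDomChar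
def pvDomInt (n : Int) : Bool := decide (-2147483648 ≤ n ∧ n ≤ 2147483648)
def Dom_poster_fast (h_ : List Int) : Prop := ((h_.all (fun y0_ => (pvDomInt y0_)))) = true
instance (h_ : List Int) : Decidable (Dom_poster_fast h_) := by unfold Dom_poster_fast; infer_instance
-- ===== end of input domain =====

-- B is a stack-free quadratic backward-scan re-implementation of A's monotonic-stack count; same return value, no speed claim.

-- ===== PORT A =====
-- the inner `while len(q) and q[-1] > h[i]: q.pop()` loop; stack held with its top at the head
def pvPopW (q : List Int) (x : Int) : List Int :=
  match q with
  | [] => []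
  | t :: r => if t > x then pvPopW r x else t :: r

-- one iteration of A's `for` body acting on the state (q, counter)
def pvStepA (st : List Int × Int) (x : Int) : List Int × Int :=
  let q := pvPopW st.1 x
  match q with
  | [] => (x :: q, st.2 + 1)
  | t :: _ => if t < x then (x :: q, st.2 + 1) else (q, st.2)

def poster_fast (h_ : List Int) : Int :=
  (h_.foldl pvStepA ([], 0)).2

-- ===== PORT B =====
-- B's inner backward scan `j = i-1; while j >= 0 and h[j] > h[i]: j -= 1`,
-- run over the already-seen prefix kept in reverse order
def pvScanBack (rev : List Int) (x : Int) : Bool :=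
  match rev with
  | [] => true
  | y :: r => if y > x then pvScanBack r x else decide (y < x)

def pvStepB (st : List Int × Int) (x : Int) : List Int × Int :=
  (x :: st.1, st.2 + (if pvScanBack st.1 x then 1 else 0))

def poster_fast_alt (h_ : List Int) : Int :=
  (h_.foldl pvStepB ([], 0)).2

-- ===== PRECONDITION & SPEC =====
def Spec_poster_fast (h_ : List Int) (out : Int) : Prop := out = poster_fast_alt h_
instance (h_ : List Int) (out : Int) : Decidable (Spec_poster_fast h_ out) := by unfold Spec_poster_fast; infer_instance

-- ===== CLAIM (what is proved, stated in full; the proofs are below) =====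
def Claim_equal_poster_fast : Prop := ∀ (h_ : List Int), Dom_poster_fast h_ → Spec_poster_fast h_ (poster_fast h_)

-- ===== LEMMAS AND PROOFS =====

-- the stack A holds after processing a prefix p (same fold as port A, counter ignored)
def pvStackOf (p : List Int) : List Int := (p.foldl pvStepA ([], 0)).1

-- A's push/no-push decision on stack q for value x
def pvDec (q : List Int) (x : Int) : Bool :=
  match pvPopW q x with
  | [] => true
  | t :: _ => decide (t < x)

lemma pvStepA_fst (st : List Int × Int) (x : Int) :
    (pvStepA st x).1 = (if pvDec st.1 x then x :: pvPopW st.1 x else pvPopW st.1 x) := by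
  unfold pvStepA pvDec
  cases h : pvPopW st.1 x with
  | nil => simp
  | cons t r => by_cases h1 : t < x <;> simp [h1]

lemma pvStepA_snd (st : List Int × Int) (x : Int) :
    (pvStepA st x).2 = st.2 + (if pvDec st.1 x then 1 else 0) := by
  unfold pvStepA pvDec
  cases h : pvPopW st.1 x with
  | nil => simp
  | cons t r => by_cases h1 : t < x <;> simp [h1]

lemma pvPopW_popW (q : List Int) (x y : Int) (hxy : x < y) :
    pvPopW (pvPopW q y) x = pvPopW q x := by
  induction q with
  | nil => simp [pvPopW]
  | cons t r ih =>
    by_cases ht : t > y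
    · have : t > x := by omega
      simp [pvPopW, ht, this, ih]
    · simp [pvPopW, ht]

-- the key step lemma: A's decision after one more processed element y
lemma pvDec_step (q : List Int) (y x : Int) :
    pvDec (pvStepA (q, 0) y).1 x = (if y > x then pvDec q x else decide (y < x)) := by
  rw [pvStepA_fst]
  by_cases hyx : y > x
  · simp only [if_pos hyx]
    by_cases hd : pvDec (q, 0).1 y
    · -- pushed: stack is y :: pvPopW q y
      simp only [if_pos hd]
      unfold pvDec
      rw [show pvPopW (y :: pvPopW q y) x = pvPopW (pvPopW q y) x by simp [pvPopW, hyx]]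
      rw [pvPopW_popW q x y hyx]
    · -- not pushed: pvPopW q y = t :: _, t = y (since ¬ t < y and ¬ t > y after popW)
      simp only [if_neg hd]
      unfold pvDec at hd ⊢
      cases hq : pvPopW q y with
      | nil => simp [hq] at hd
      | cons t r =>
        simp only [hq] at hd
        have ht : ¬ t < y := by simpa using hd
        -- pvPopW stops when head ≤ y
        have hle : ¬ t > y := by
          have : pvPopW q y = t :: r := hq
          clear hd hq
          induction q with
          | nil => simp [pvPopW] at this
          | cons a b ih =>
            by_cases hab : a > y
            · simp [pvPopW, hab] at this; exact ih this
            · simp [pvPopW, hab] at this; omega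
        have hty : t = y := by omega
        have htr : pvPopW (t :: r) x = pvPopW r x := by
          simp only [pvPopW]; rw [if_pos (by omega)]
        rw [htr]
        have := pvPopW_popW q x y hyx
        rw [hq, htr] at this
        rw [this]
  · -- y ≤ x : stack head is y in every branch, no pop, decision = (y < x)
    simp only [if_neg hyx]
    by_cases hd : pvDec (q, 0).1 y
    · simp only [if_pos hd]
      unfold pvDec
      simp [pvPopW, hyx]
    · simp only [if_neg hd]
      unfold pvDec at hd ⊢
      cases hq : pvPopW q y with
      | nil => simp [hq] at hd
      | cons t r =>
        simp only [hq] at hd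
        have ht : ¬ t < y := by simpa using hd
        have hle : ¬ t > y := by
          have h2 : pvPopW q y = t :: r := hq
          clear hd hq
          induction q with
          | nil => simp [pvPopW] at h2
          | cons a b ih =>
            by_cases hab : a > y
            · simp [pvPopW, hab] at h2; exact ih h2
            · simp [pvPopW, hab] at h2; omega
        have hty : t = y := by omega
        have hnxy : ¬ x < y := by omega
        simp [pvPopW, hty, hnxy]

lemma pvStackOf_append (p : List Int) (y : Int) :
    pvStackOf (p ++ [y]) = (pvStepA (pvStackOf p, 0) y).1 := by
  unfold pvStackOf
  rw [List.foldl_append]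
  simp only [List.foldl_cons, List.foldl_nil]
  simp [pvStepA_fst]

-- B's backward scan over the reversed prefix equals A's decision on A's stack for that prefix
lemma pvScan_eq_dec (rev : List Int) (x : Int) :
    pvScanBack rev x = pvDec (pvStackOf rev.reverse) x := by
  induction rev generalizing x with
  | nil => simp [pvScanBack, pvStackOf, pvDec, pvPopW]
  | cons y r ih =>
    have : (y :: r).reverse = r.reverse ++ [y] := by simp
    rw [this, pvStackOf_append, pvDec_step]
    by_cases hyx : y > x
    · simp [pvScanBack, hyx, ih]
    · simp [pvScanBack, hyx]

-- main fold invariant: both folds keep equal counters, A's stack = stack of B's reversed prefix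
lemma pvFold_eq (p : List Int) (rev : List Int) (q : List Int) (c : Int)
    (hq : q = pvStackOf rev.reverse) :
    (p.foldl pvStepA (q, c)).2 = (p.foldl pvStepB (rev, c)).2 := by
  induction p generalizing rev q c with
  | nil => simp
  | cons x p ih =>
    simp only [List.foldl_cons]
    have hA1 : (pvStepA (q, c) x).1 = (pvStepA (q, 0) x).1 := by
      rw [pvStepA_fst, pvStepA_fst]
    have hA2 : (pvStepA (q, c) x).2 = c + (if pvScanBack rev x then 1 else 0) := by
      rw [pvStepA_snd, hq, ← pvScan_eq_dec]
    have hB : pvStepB (rev, c) x = (x :: rev, c + (if pvScanBack rev x then 1 else 0)) := by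
      rfl
    rw [show pvStepA (q, c) x = ((pvStepA (q, 0) x).1, c + (if pvScanBack rev x then 1 else 0)) from
      Prod.ext (by rw [hA1]) (by rw [hA2]), hB]
    apply ih
    rw [hq, show (x :: rev).reverse = rev.reverse ++ [x] by simp, pvStackOf_append]

-- ===== VERDICT (by name: the statement is the Claim_ definition above) =====
theorem poster_fast_spec : Claim_equal_poster_fast := by
  intro h_ _
  unfold Spec_poster_fast poster_fast poster_fast_alt
  exact pvFold_eq h_ [] [] 0 rfl
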